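-- pv_equiv track=rewrite | github.com/ZosiaZamoyska/algorithms | solutions/introduction/Two Pointer Technique/temperature.py | longest_non_decreasing_interval
-- ===== SOURCE A (Python) =====
-- from collections import deque
--
-- def longest_non_decreasing_interval(n, intervals):
--     x = [a for a, b in intervals]
--     y = [b for a, b in intervals]
--
--     max_x = deque()
--     min_y = deque()
--
--     res = 0
--     left = 0
--
--     for right in range(n):
--         while max_x and x[right] > max_x[-1]:
--             max_x.pop()
--         max_x.append(x[right])
--
--         while min_y and y[right] < min_y[-1]:
--             min_y.pop()
--         min_y.append(y[right])
--
--         while max_x[0] > min_y[0]: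
--             if max_x[0] == x[left]:
--                 max_x.popleft()
--             if min_y[0] == y[left]:
--                 min_y.popleft()
--             left += 1
--
--         res = max(res, right - left + 1)
--
--     return res
-- ===== SOURCE B (Python) =====
-- def longest_non_decreasing_interval(n, intervals):
--     best = 0
--     for i in range(n):
--         hi, lo = intervals[i]
--         for j in range(i, n):
--             a, b = intervals[j]
--             hi = max(hi, a)
--             lo = min(lo, b)
--             if hi <= lo and j - i + 1 > best:
--                 best = j - i + 1
--     return best
-- ===== Notes on version B (the rewrite author's own statement) =====
-- stated objective: simpler
-- what changed: Replaces the two-pointer sweep with monotonic max/min deques by a plain nested scan that grows each window while maintaining its running max/min, with no deques and no pointer bookkeeping.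
import Mathlib
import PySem

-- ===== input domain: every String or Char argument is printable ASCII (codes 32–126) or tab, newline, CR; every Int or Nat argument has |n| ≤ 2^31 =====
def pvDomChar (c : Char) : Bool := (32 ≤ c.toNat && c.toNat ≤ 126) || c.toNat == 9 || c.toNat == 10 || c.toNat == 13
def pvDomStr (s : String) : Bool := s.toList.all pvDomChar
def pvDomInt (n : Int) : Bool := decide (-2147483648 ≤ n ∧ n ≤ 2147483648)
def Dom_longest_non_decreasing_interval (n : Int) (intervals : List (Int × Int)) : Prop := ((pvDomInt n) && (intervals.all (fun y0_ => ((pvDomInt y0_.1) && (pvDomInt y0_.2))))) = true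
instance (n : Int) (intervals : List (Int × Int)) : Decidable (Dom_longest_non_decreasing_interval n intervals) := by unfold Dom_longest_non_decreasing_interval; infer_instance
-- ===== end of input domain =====

-- B replaces A's two-pointer sweep with monotonic deques by a plain nested scan that
-- grows each window while maintaining its running max/min (simpler; not faster).

-- ===== PORT A =====
-- 'while dq and p(dq[-1]): dq.pop()' — pops from the back of the deque while p holds
def pvPopBack (p : Int → Bool) (dq : List Int) : List Int :=
  if h : dq = [] then []
  else if p (dq.getLast h) then pvPopBack p dq.dropLast else dq
termination_by dq.length
decreasing_by
  simp only [List.length_dropLast]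
  have : dq.length ≠ 0 := fun hl => h (List.eq_nil_of_length_eq_zero hl)
  omega

-- 'while max_x[0] > min_y[0]: …' — fueled transcription of the shrink loop; the fuel
-- (x.length + 1) is never exhausted on inputs satisfying Pre_, and heads are read with
-- a default (Python would raise IndexError there, which Pre_ excludes)
def pvShrink (x y : List Int) : Nat → (List Int × List Int × Int) → (List Int × List Int × Int)
  | 0, s => s
  | fuel+1, (maxdq, mindq, left) =>
    if maxdq.headD 0 > mindq.headD 0 then
      let maxdq' := if maxdq.headD 0 = x.getD left.toNat 0 then maxdq.tail else maxdq
      let mindq' := if mindq.headD 0 = y.getD left.toNat 0 then mindq.tail else mindq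
      pvShrink x y fuel (maxdq', mindq', left + 1)
    else (maxdq, mindq, left)

-- body of 'for right in range(n)': the two push-pops, the shrink loop, the res update
def pvStepA (x y : List Int) (s : List Int × List Int × Int × Int) (right : Int) :
    List Int × List Int × Int × Int :=
  let maxdq := s.1
  let mindq := s.2.1
  let left := s.2.2.1
  let res := s.2.2.2
  let xr := x.getD right.toNat 0
  let yr := y.getD right.toNat 0
  let maxdq1 := pvPopBack (fun v => xr > v) maxdq ++ [xr]
  let mindq1 := pvPopBack (fun v => yr < v) mindq ++ [yr]
  let t := pvShrink x y (x.length + 1) (maxdq1, mindq1, left)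
  (t.1, t.2.1, t.2.2, max res (right - t.2.2 + 1))

def longest_non_decreasing_interval (n : Int) (intervals : List (Int × Int)) : Int :=
  let x := intervals.map Prod.fst
  let y := intervals.map Prod.snd
  ((PySem.List.pyRange 0 n 1).foldl (pvStepA x y) ([], [], 0, 0)).2.2.2

-- ===== PORT B =====
-- body of 'for j in range(i, n)': grow the window, update running max/min and best
def pvInnerB (intervals : List (Int × Int)) (i : Int) (s : Int × Int × Int) (j : Int) :
    Int × Int × Int :=
  let ab := intervals.getD j.toNat (0, 0)
  let hi := max s.1 ab.1
  let lo := min s.2.1 ab.2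
  if hi ≤ lo ∧ j - i + 1 > s.2.2 then (hi, lo, j - i + 1) else (hi, lo, s.2.2)

-- body of 'for i in range(n)': scan all windows starting at i
def pvOuterB (n : Int) (intervals : List (Int × Int)) (best : Int) (i : Int) : Int :=
  let hl := intervals.getD i.toNat (0, 0)
  ((PySem.List.pyRange i n 1).foldl (pvInnerB intervals i) (hl.1, hl.2, best)).2.2

def longest_non_decreasing_interval_alt (n : Int) (intervals : List (Int × Int)) : Int :=
  (PySem.List.pyRange 0 n 1).foldl (pvOuterB n intervals) 0

-- ===== PRECONDITION & SPEC =====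
-- Pre_ excludes exactly the inputs on which A raises IndexError: n beyond the list's
-- length (x[right] fails), and a decreasing interval (a > b) among the first n (the
-- shrink loop exhausts both deques and max_x[0] fails).
def Pre_longest_non_decreasing_interval (n : Int) (intervals : List (Int × Int)) : Prop :=
  n ≤ intervals.length ∧ ∀ p ∈ intervals.take n.toNat, p.1 ≤ p.2
instance (n : Int) (intervals : List (Int × Int)) : Decidable (Pre_longest_non_decreasing_interval n intervals) := by unfold Pre_longest_non_decreasing_interval; infer_instance

def pvWitness_longest_non_decreasing_interval : Int × (List (Int × Int)) := (4, [(1, 3), (2, 5), (0, 2), (4, 6)])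

def Spec_longest_non_decreasing_interval (n : Int) (intervals : List (Int × Int)) (out : Int) : Prop := out = longest_non_decreasing_interval_alt n intervals
instance (n : Int) (intervals : List (Int × Int)) (out : Int) : Decidable (Spec_longest_non_decreasing_interval n intervals out) := by unfold Spec_longest_non_decreasing_interval; infer_instance

-- ===== CLAIM (what is proved, stated in full; the proofs are below) =====
def Claim_equal_longest_non_decreasing_interval : Prop := ∀ (n : Int) (intervals : List (Int × Int)), Dom_longest_non_decreasing_interval n intervals → Pre_longest_non_decreasing_interval n intervals → Spec_longest_non_decreasing_interval n intervals (longest_non_decreasing_interval n intervals)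

-- ===== LEMMAS AND PROOFS =====

theorem pvPopBack_nil (p : Int → Bool) : pvPopBack p [] = [] := by
  simp [pvPopBack]

theorem pvPopBack_cons (p : Int → Bool) (a : Int) (dq : List Int) :
    pvPopBack p (a :: dq) =
      if pvPopBack p dq = [] ∧ p a then [] else a :: pvPopBack p dq := by
  induction dq using pvPopBack.induct p with
  | case1 =>
      rw [pvPopBack, pvPopBack]
      simp [pvPopBack_nil]
  | case2 dq h hp ih =>
      rw [pvPopBack]
      conv_rhs => rw [pvPopBack]
      simp only [List.cons_ne_nil, reduceDIte, List.getLast_cons h, hp, if_true,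
        List.dropLast_cons_of_ne_nil h, ih, dif_neg h]
  | case3 dq h hp =>
      rw [pvPopBack]
      conv_rhs => rw [pvPopBack]
      simp only [List.cons_ne_nil, reduceDIte, List.getLast_cons h, hp, if_false,
        dif_neg h]
      simp [h]

theorem pvPopBack_mem {p : Int → Bool} {dq : List Int} {u : Int}
    (h : u ∈ pvPopBack p dq) : u ∈ dq := by
  induction dq using pvPopBack.induct p with
  | case1 => simpa [pvPopBack_nil] using h
  | case2 dq hne hp ih =>
      rw [pvPopBack, dif_neg hne, if_pos hp] at h
      exact (List.dropLast_sublist dq).mem (ih h)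
  | case3 dq hne hp =>
      rwa [pvPopBack, dif_neg hne, if_neg (by simp [hp])] at h

theorem pvPopBack_all {p : Int → Bool} {dq : List Int}
    (h : ∀ u ∈ dq, p u) : pvPopBack p dq = [] := by
  induction dq using pvPopBack.induct p with
  | case1 => simp [pvPopBack_nil]
  | case2 dq hne hp ih =>
      rw [pvPopBack, dif_neg hne, if_pos hp]
      exact ih (fun u hu => h u ((List.dropLast_sublist dq).mem hu))
  | case3 dq hne hp =>
      exact absurd (h _ (List.getLast_mem hne)) (by simp [hp])

def pvStepMax (dq : List Int) (v : Int) : List Int := pvPopBack (fun u => v > u) dq ++ [v]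
def pvStepMin (dq : List Int) (v : Int) : List Int := pvPopBack (fun u => v < u) dq ++ [v]
def pvPushMax (w : List Int) : List Int := w.foldl pvStepMax []
def pvPushMin (w : List Int) : List Int := w.foldl pvStepMin []

theorem pvFoldMax_keep {w : List Int} {a : Int} (hw : ∀ v ∈ w, v ≤ a) :
    ∀ dq : List Int, w.foldl pvStepMax (a :: dq) = a :: w.foldl pvStepMax dq := by
  induction w with
  | nil => intro dq; simp
  | cons v w ih =>
      intro dq
      have hva : v ≤ a := hw v (by simp)
      have : pvStepMax (a :: dq) v = a :: pvStepMax dq v := by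
        simp only [pvStepMax, pvPopBack_cons]
        rw [if_neg (by simp; omega)]
        simp
      simp only [List.foldl_cons, this]
      exact ih (fun u hu => hw u (by simp [hu])) _

theorem pvFoldMax_drop {w : List Int} {a : Int} (hw : ∃ v ∈ w, a < v) :
    ∀ dq : List Int, (∀ u ∈ dq, u ≤ a) → w.foldl pvStepMax (a :: dq) = w.foldl pvStepMax dq := by
  induction w with
  | nil => simp at hw
  | cons v w ih =>
      intro dq hdq
      by_cases hva : a < v
      · have h1 : pvStepMax (a :: dq) v = [v] := by
          simp only [pvStepMax]
          rw [pvPopBack_all (p := fun u => v > u) (by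
            intro u hu
            simp only [List.mem_cons] at hu
            rcases hu with rfl | hu
            · simp; omega
            · have := hdq u hu; simp; omega)]
          rfl
        have h2 : pvStepMax dq v = [v] := by
          simp only [pvStepMax]
          rw [pvPopBack_all (p := fun u => v > u) (by
            intro u hu; have := hdq u hu; simp; omega)]
          rfl
        simp only [List.foldl_cons, h1, h2]
      · have hex : ∃ x ∈ w, a < x := by
          rcases hw with ⟨x, hx, hax⟩
          simp only [List.mem_cons] at hx
          rcases hx with rfl | hx
          · omega
          · exact ⟨x, hx, hax⟩
        have h1 : pvStepMax (a :: dq) v = a :: pvStepMax dq v := by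
          simp only [pvStepMax, pvPopBack_cons]
          rw [if_neg (by simp; omega)]
          simp
        simp only [List.foldl_cons, h1]
        refine ih hex _ ?_
        intro u hu
        simp only [pvStepMax, List.mem_append, List.mem_singleton] at hu
        rcases hu with hu | rfl
        · exact hdq u (pvPopBack_mem hu)
        · omega

theorem pvPushMax_cons (a : Int) (w : List Int) :
    pvPushMax (a :: w) =
      if ∀ v ∈ w, v ≤ a then a :: pvPushMax w else pvPushMax w := by
  have h0 : pvStepMax [] a = [a] := by simp [pvStepMax, pvPopBack_nil]
  by_cases h : ∀ v ∈ w, v ≤ a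
  · rw [if_pos h]
    simp only [pvPushMax, List.foldl_cons, h0]
    exact pvFoldMax_keep h []
  · rw [if_neg h]
    push Not at h
    simp only [pvPushMax, List.foldl_cons, h0]
    exact pvFoldMax_drop (by simpa using h) [] (by simp)

theorem pvFoldMin_keep {w : List Int} {a : Int} (hw : ∀ v ∈ w, a ≤ v) :
    ∀ dq : List Int, w.foldl pvStepMin (a :: dq) = a :: w.foldl pvStepMin dq := by
  induction w with
  | nil => intro dq; simp
  | cons v w ih =>
      intro dq
      have hva : a ≤ v := hw v (by simp)
      have : pvStepMin (a :: dq) v = a :: pvStepMin dq v := by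
        simp only [pvStepMin, pvPopBack_cons]
        rw [if_neg (by simp; omega)]
        simp
      simp only [List.foldl_cons, this]
      exact ih (fun u hu => hw u (by simp [hu])) _

theorem pvFoldMin_drop {w : List Int} {a : Int} (hw : ∃ v ∈ w, v < a) :
    ∀ dq : List Int, (∀ u ∈ dq, a ≤ u) → w.foldl pvStepMin (a :: dq) = w.foldl pvStepMin dq := by
  induction w with
  | nil => simp at hw
  | cons v w ih =>
      intro dq hdq
      by_cases hva : v < a
      · have h1 : pvStepMin (a :: dq) v = [v] := by
          simp only [pvStepMin]
          rw [pvPopBack_all (p := fun u => v < u) (by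
            intro u hu
            simp only [List.mem_cons] at hu
            rcases hu with rfl | hu
            · simp; omega
            · have := hdq u hu; simp; omega)]
          rfl
        have h2 : pvStepMin dq v = [v] := by
          simp only [pvStepMin]
          rw [pvPopBack_all (p := fun u => v < u) (by
            intro u hu; have := hdq u hu; simp; omega)]
          rfl
        simp only [List.foldl_cons, h1, h2]
      · have hex : ∃ x ∈ w, x < a := by
          rcases hw with ⟨x, hx, hax⟩
          simp only [List.mem_cons] at hx
          rcases hx with rfl | hx
          · omega
          · exact ⟨x, hx, hax⟩
        have h1 : pvStepMin (a :: dq) v = a :: pvStepMin dq v := by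
          simp only [pvStepMin, pvPopBack_cons]
          rw [if_neg (by simp; omega)]
          simp
        simp only [List.foldl_cons, h1]
        refine ih hex _ ?_
        intro u hu
        simp only [pvStepMin, List.mem_append, List.mem_singleton] at hu
        rcases hu with hu | rfl
        · exact hdq u (pvPopBack_mem hu)
        · omega

theorem pvPushMin_cons (a : Int) (w : List Int) :
    pvPushMin (a :: w) =
      if ∀ v ∈ w, a ≤ v then a :: pvPushMin w else pvPushMin w := by
  have h0 : pvStepMin [] a = [a] := by simp [pvStepMin, pvPopBack_nil]
  by_cases h : ∀ v ∈ w, a ≤ v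
  · rw [if_pos h]
    simp only [pvPushMin, List.foldl_cons, h0]
    exact pvFoldMin_keep h []
  · rw [if_neg h]
    push Not at h
    simp only [pvPushMin, List.foldl_cons, h0]
    exact pvFoldMin_drop (by simpa using h) [] (by simp)

def pvIsMax (b : Int) (w : List Int) : Prop := b ∈ w ∧ ∀ a ∈ w, a ≤ b
def pvIsMin (b : Int) (w : List Int) : Prop := b ∈ w ∧ ∀ a ∈ w, b ≤ a

theorem pvPushMax_spec {w : List Int} (hw : w ≠ []) :
    pvPushMax w ≠ [] ∧ pvIsMax ((pvPushMax w).headD 0) w := by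
  induction w with
  | nil => exact absurd rfl hw
  | cons a w ih =>
      rw [pvPushMax_cons]
      by_cases h : ∀ v ∈ w, v ≤ a
      · rw [if_pos h]
        refine ⟨by simp, by simp, ?_⟩
        intro v hv
        simp only [List.mem_cons] at hv
        rcases hv with rfl | hv
        · simp
        · simpa using h v hv
      · rw [if_neg h]
        push Not at h
        obtain ⟨v, hv, hav⟩ := h
        have hwne : w ≠ [] := by rintro rfl; simp at hv
        obtain ⟨hne, hmem, hmax⟩ := ih hwne
        refine ⟨hne, List.mem_cons_of_mem a hmem, ?_⟩
        intro u hu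
        simp only [List.mem_cons] at hu
        rcases hu with rfl | hu
        · exact le_trans (le_of_lt hav) (hmax v hv)
        · exact hmax u hu

theorem pvPushMin_spec {w : List Int} (hw : w ≠ []) :
    pvPushMin w ≠ [] ∧ pvIsMin ((pvPushMin w).headD 0) w := by
  induction w with
  | nil => exact absurd rfl hw
  | cons a w ih =>
      rw [pvPushMin_cons]
      by_cases h : ∀ v ∈ w, a ≤ v
      · rw [if_pos h]
        refine ⟨by simp, by simp, ?_⟩
        intro v hv
        simp only [List.mem_cons] at hv
        rcases hv with rfl | hv
        · simp
        · simpa using h v hv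
      · rw [if_neg h]
        push Not at h
        obtain ⟨v, hv, hav⟩ := h
        have hwne : w ≠ [] := by rintro rfl; simp at hv
        obtain ⟨hne, hmem, hmin⟩ := ih hwne
        refine ⟨hne, List.mem_cons_of_mem a hmem, ?_⟩
        intro u hu
        simp only [List.mem_cons] at hu
        rcases hu with rfl | hu
        · exact le_trans (hmin v hv) (le_of_lt hav)
        · exact hmin u hu

def pvWin (x : List Int) (l u : ℕ) : List Int := (x.take u).drop l

theorem pvWin_zero (x : List Int) (l : ℕ) : pvWin x l 0 = [] := by simp [pvWin]

theorem pvWin_ne_nil {x : List Int} {l u : ℕ} (h1 : l < u) (h2 : u ≤ x.length) :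
    pvWin x l u ≠ [] := by
  have : (pvWin x l u).length = u - l := by
    simp [pvWin, List.length_drop, List.length_take]
    omega
  intro hnil
  rw [hnil] at this
  simp at this
  omega

theorem pvWin_mem {x : List Int} {l u : ℕ} {a : Int} (h2 : u ≤ x.length) :
    a ∈ pvWin x l u ↔ ∃ p, l ≤ p ∧ p < u ∧ a = x.getD p 0 := by
  constructor
  · intro ha
    obtain ⟨k, hk, hget⟩ := List.mem_iff_getElem.mp ha
    have hklen : l + k < u := by
      have := hk
      simp [pvWin, List.length_drop, List.length_take] at this
      omega
    refine ⟨l + k, by omega, hklen, ?_⟩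
    rw [← hget]
    simp only [pvWin, List.getElem_drop, List.getElem_take]
    rw [List.getD_eq_getElem _ _ (by omega)]
  · rintro ⟨p, hlp, hpu, rfl⟩
    rw [List.mem_iff_getElem]
    refine ⟨p - l, ?_, ?_⟩
    · simp [pvWin, List.length_drop, List.length_take]; omega
    · simp only [pvWin, List.getElem_drop, List.getElem_take]
      rw [List.getD_eq_getElem _ _ (by omega)]
      congr 2
      omega

theorem pvWin_snoc {x : List Int} {l u : ℕ} (h1 : l ≤ u) (h2 : u < x.length) :
    pvWin x l (u + 1) = pvWin x l u ++ [x.getD u 0] := by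
  simp only [pvWin]
  rw [List.getD_eq_getElem _ _ h2, List.take_succ, List.getElem?_eq_getElem h2]
  simp only [Option.toList_some]
  rw [List.drop_append_of_le_length (by simp [List.length_take]; omega)]

theorem pvWin_head {x : List Int} {l u : ℕ} (h1 : l < u) (h2 : u ≤ x.length) :
    pvWin x l u = x.getD l 0 :: pvWin x (l + 1) u := by
  have hl : l < (x.take u).length := by simp [List.length_take]; omega
  rw [pvWin, List.drop_eq_getElem_cons hl]
  have : (List.take u x)[l] = x.getD l 0 := by
    simp only [List.getElem_take]
    rw [List.getD_eq_getElem _ _ (by omega)]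
  rw [this]
  rfl

def pvValid (x y : List Int) (l u : ℕ) : Prop :=
  ∀ p q : ℕ, l ≤ p → p < u → l ≤ q → q < u → x.getD p 0 ≤ y.getD q 0

theorem pvValid_anti_u {x y : List Int} {l u u' : ℕ} (h : u' ≤ u) (hv : pvValid x y l u) :
    pvValid x y l u' := fun p q h1 h2 h3 h4 => hv p q h1 (by omega) h3 (by omega)

theorem pvValid_refl (x y : List Int) (u : ℕ) : pvValid x y u u :=
  fun p q h1 h2 _ _ => by omega

noncomputable def pvL (x y : List Int) (u : ℕ) : ℕ := sInf {l | pvValid x y l u}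

theorem pvL_valid (x y : List Int) (u : ℕ) : pvValid x y (pvL x y u) u :=
  Nat.sInf_mem (s := {l | pvValid x y l u}) ⟨u, pvValid_refl x y u⟩

theorem pvL_le {x y : List Int} {l u : ℕ} (h : pvValid x y l u) : pvL x y u ≤ l :=
  Nat.sInf_le h

theorem pvL_zero (x y : List Int) : pvL x y 0 = 0 :=
  Nat.le_zero.mp (pvL_le (pvValid_refl x y 0))

theorem pvValid_iff_max_le_min {x y : List Int} {l u : ℕ} {bx by' : Int}
    (h1 : l < u) (hx : u ≤ x.length) (hy : u ≤ y.length)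
    (hbx : pvIsMax bx (pvWin x l u)) (hby : pvIsMin by' (pvWin y l u)) :
    pvValid x y l u ↔ bx ≤ by' := by
  constructor
  · intro hv
    obtain ⟨p, hlp, hpu, hpx⟩ := (pvWin_mem hx).mp hbx.1
    obtain ⟨q, hlq, hqu, hqy⟩ := (pvWin_mem hy).mp hby.1
    rw [hpx, hqy]
    exact hv p q hlp hpu hlq hqu
  · intro hle p q h1p h2p h1q h2q
    have hxp : x.getD p 0 ≤ bx :=
      hbx.2 _ ((pvWin_mem hx).mpr ⟨p, h1p, h2p, rfl⟩)
    have hyq : by' ≤ y.getD q 0 :=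
      hby.2 _ ((pvWin_mem hy).mpr ⟨q, h1q, h2q, rfl⟩)
    omega

theorem pvShrinkStep_max {x : List Int} {l u : ℕ} (h1 : l < u) (h2 : u ≤ x.length) :
    (if (pvPushMax (pvWin x l u)).headD 0 = x.getD l 0
      then (pvPushMax (pvWin x l u)).tail else pvPushMax (pvWin x l u)) =
    pvPushMax (pvWin x (l + 1) u) := by
  rw [pvWin_head h1 h2, pvPushMax_cons]
  by_cases h : ∀ v ∈ pvWin x (l + 1) u, v ≤ x.getD l 0
  · rw [if_pos h]
    simp
  · rw [if_neg h]
    push Not at h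
    obtain ⟨v, hv, hlt⟩ := h
    have hwne : pvWin x (l + 1) u ≠ [] := by rintro hn; rw [hn] at hv; simp at hv
    obtain ⟨_, hmem, hmax⟩ := pvPushMax_spec hwne
    rw [if_neg (by have := hmax v hv; omega)]

theorem pvShrinkStep_min {y : List Int} {l u : ℕ} (h1 : l < u) (h2 : u ≤ y.length) :
    (if (pvPushMin (pvWin y l u)).headD 0 = y.getD l 0
      then (pvPushMin (pvWin y l u)).tail else pvPushMin (pvWin y l u)) =
    pvPushMin (pvWin y (l + 1) u) := by
  rw [pvWin_head h1 h2, pvPushMin_cons]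
  by_cases h : ∀ v ∈ pvWin y (l + 1) u, y.getD l 0 ≤ v
  · rw [if_pos h]
    simp
  · rw [if_neg h]
    push Not at h
    obtain ⟨v, hv, hlt⟩ := h
    have hwne : pvWin y (l + 1) u ≠ [] := by rintro hn; rw [hn] at hv; simp at hv
    obtain ⟨_, hmem, hmin⟩ := pvPushMin_spec hwne
    rw [if_neg (by have := hmin v hv; omega)]


theorem pvShrink_run {x y : List Int} (hy : y.length = x.length) {u : ℕ} (hu : u ≤ x.length)
    (hLu : pvL x y u < u) :
    ∀ fuel l, l ≤ pvL x y u → pvL x y u - l < fuel →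
      pvShrink x y fuel (pvPushMax (pvWin x l u), pvPushMin (pvWin y l u), (l : Int)) =
        (pvPushMax (pvWin x (pvL x y u) u), pvPushMin (pvWin y (pvL x y u) u), (pvL x y u : Int)) := by
  intro fuel
  induction fuel with
  | zero => intro l hl hf; omega
  | succ fuel ih =>
      intro l hl hf
      have hlu : l < u := lt_of_le_of_lt (by omega) hLu
      have hxw := pvPushMax_spec (pvWin_ne_nil hlu hu)
      have hyw := pvPushMin_spec (pvWin_ne_nil (x := y) hlu (by omega))
      have hcond : ((pvPushMin (pvWin y l u)).headD 0 < (pvPushMax (pvWin x l u)).headD 0) ↔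
          ¬ pvValid x y l u := by
        rw [pvValid_iff_max_le_min (y := y) hlu hu (by omega) hxw.2 hyw.2]
        omega
      rcases eq_or_lt_of_le hl with rfl | hllt
      · have hvalid := pvL_valid x y u
        simp only [pvShrink]
        rw [if_neg (by rw [gt_iff_lt, hcond]; exact not_not_intro hvalid)]
      · have hnv : ¬ pvValid x y l u := fun hv => by have := pvL_le hv; omega
        simp only [pvShrink]
        rw [if_pos (by rw [gt_iff_lt, hcond]; exact hnv)]
        simp only [Int.toNat_natCast]
        have hcast : (l : Int) + 1 = ((l + 1 : ℕ) : Int) := by push_cast; ring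
        rw [hcast, ← ih (l + 1) (by omega) (by omega)]
        apply congrArg (pvShrink x y fuel)
        exact Prod.ext (pvShrinkStep_max hlu hu)
          (Prod.ext (pvShrinkStep_min hlu (by omega)) rfl)

theorem pvL_le_self (x y : List Int) (u : ℕ) : pvL x y u ≤ u := pvL_le (pvValid_refl x y u)

theorem pvL_mono (x y : List Int) (t : ℕ) : pvL x y t ≤ pvL x y (t + 1) :=
  pvL_le (pvValid_anti_u (by omega) (pvL_valid x y (t + 1)))

theorem pvL_succ_le {x y : List Int} {t : ℕ} (hsv : x.getD t 0 ≤ y.getD t 0) :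
    pvL x y (t + 1) ≤ t := by
  refine pvL_le ?_
  intro p q h1 h2 h3 h4
  have hp : p = t := by omega
  have hq : q = t := by omega
  subst hp; subst hq; exact hsv

def pvPres (x y : List Int) (t : ℕ) (res : Int) : Prop :=
  0 ≤ res ∧ (∀ l u : ℕ, l < u → u ≤ t → pvValid x y l u → ((u : Int) - l) ≤ res) ∧
    (res = 0 ∨ ∃ l u : ℕ, l < u ∧ u ≤ t ∧ pvValid x y l u ∧ res = (u : Int) - l)

theorem pvPres_unique {x y : List Int} {t : ℕ} {r1 r2 : Int}
    (h1 : pvPres x y t r1) (h2 : pvPres x y t r2) : r1 = r2 := by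
  obtain ⟨h10, h1b, h1e⟩ := h1
  obtain ⟨h20, h2b, h2e⟩ := h2
  rcases h1e with rfl | ⟨l1, u1, hlt1, hle1, hv1, rfl⟩
  · rcases h2e with rfl | ⟨l2, u2, hlt2, hle2, hv2, rfl⟩
    · rfl
    · have := h1b l2 u2 hlt2 hle2 hv2
      omega
  · rcases h2e with rfl | ⟨l2, u2, hlt2, hle2, hv2, rfl⟩
    · have := h2b l1 u1 hlt1 hle1 hv1
      omega
    · have := h1b l2 u2 hlt2 hle2 hv2
      have := h2b l1 u1 hlt1 hle1 hv1
      omega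


theorem pvFoldA {x y : List Int} (hy : y.length = x.length) {m : ℕ} (hm : m ≤ x.length)
    (hsv : ∀ i, i < m → x.getD i 0 ≤ y.getD i 0) :
    ∀ t, t ≤ m → ∃ res : Int,
      (List.range t).foldl (fun (s : List Int × List Int × Int × Int) (k : ℕ) => pvStepA x y s (k : Int)) ([], [], 0, 0) =
        (pvPushMax (pvWin x (pvL x y t) t), pvPushMin (pvWin y (pvL x y t) t),
          (pvL x y t : Int), res) ∧ pvPres x y t res := by
  intro t
  induction t with
  | zero =>
      intro _
      refine ⟨0, ?_, le_refl 0, ?_, Or.inl rfl⟩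
      · simp [pvL_zero, pvWin_zero, pvPushMax, pvPushMin]
      · intro l u h1 h2 _; omega
  | succ t ih =>
      intro htm
      obtain ⟨res, hfold, hpres⟩ := ih (by omega)
      have hLt := pvL_le_self x y t
      have hLt1 : pvL x y (t + 1) ≤ t := pvL_succ_le (hsv t (by omega))
      have hmono := pvL_mono x y t
      have htlen : t < x.length := by omega
      refine ⟨max res ((t : Int) - (pvL x y (t + 1) : Int) + 1), ?_, ?_⟩
      · rw [List.range_succ, List.foldl_append, hfold]
        show pvStepA x y _ _ = _
        simp only [pvStepA]
        have hsx : pvPopBack (fun v => x.getD ((t : Int)).toNat 0 > v)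
              (pvPushMax (pvWin x (pvL x y t) t)) ++ [x.getD ((t : Int)).toNat 0] =
            pvPushMax (pvWin x (pvL x y t) (t + 1)) := by
          simp only [Int.toNat_natCast]
          rw [pvWin_snoc hLt htlen]
          simp only [pvPushMax, List.foldl_append, List.foldl_cons, List.foldl_nil]
          rfl
        have hsy : pvPopBack (fun v => y.getD ((t : Int)).toNat 0 < v)
              (pvPushMin (pvWin y (pvL x y t) t)) ++ [y.getD ((t : Int)).toNat 0] =
            pvPushMin (pvWin y (pvL x y t) (t + 1)) := by
          simp only [Int.toNat_natCast]
          rw [pvWin_snoc hLt (by omega)]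
          simp only [pvPushMin, List.foldl_append, List.foldl_cons, List.foldl_nil]
          rfl
        simp only [hsx, hsy]
        rw [pvShrink_run hy (by omega) (by omega) (x.length + 1) (pvL x y t)
          hmono (by omega)]
      · obtain ⟨h0, hb, he⟩ := hpres
        refine ⟨by omega, ?_, ?_⟩
        · intro l u h1 h2 hv
          rcases Nat.lt_or_ge u (t + 1) with hu | hu
          · have := hb l u h1 (by omega) hv
            omega
          · have hu1 : u = t + 1 := by omega
            subst hu1
            have := pvL_le hv
            push_cast
            omega
        · right
          rcases le_or_gt ((t : Int) - (pvL x y (t + 1) : Int) + 1) res with hc | hc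
          · rcases he with rfl | ⟨l, u, hlt, hle, hv, rfl⟩
            · refine ⟨pvL x y (t + 1), t + 1, by omega, le_refl _, pvL_valid x y (t + 1), ?_⟩
              push_cast
              omega
            · exact ⟨l, u, hlt, by omega, hv, by omega⟩
          · refine ⟨pvL x y (t + 1), t + 1, by omega, le_refl _, pvL_valid x y (t + 1), ?_⟩
            push_cast
            omega

theorem pvIsMax_snoc {b a : Int} {w : List Int} (h : pvIsMax b w) :
    pvIsMax (max b a) (w ++ [a]) := by
  refine ⟨?_, ?_⟩
  · rcases max_choice b a with hm | hm <;> rw [hm]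
    · exact List.mem_append_left _ h.1
    · exact List.mem_append_right _ (by simp)
  · intro u hu
    rcases List.mem_append.mp hu with hu | hu
    · exact le_trans (h.2 u hu) (le_max_left _ _)
    · simp only [List.mem_singleton] at hu
      subst hu
      exact le_max_right _ _

theorem pvIsMin_snoc {b a : Int} {w : List Int} (h : pvIsMin b w) :
    pvIsMin (min b a) (w ++ [a]) := by
  refine ⟨?_, ?_⟩
  · rcases min_choice b a with hm | hm <;> rw [hm]
    · exact List.mem_append_left _ h.1
    · exact List.mem_append_right _ (by simp)
  · intro u hu
    rcases List.mem_append.mp hu with hu | hu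
    · exact le_trans (min_le_left _ _) (h.2 u hu)
    · simp only [List.mem_singleton] at hu
      subst hu
      exact min_le_right _ _

theorem pvIsMax_absorb {b a : Int} {w : List Int} (ha : a ∈ w) :
    pvIsMax b (a :: w) ↔ pvIsMax b w := by
  constructor
  · rintro ⟨hmem, hle⟩
    refine ⟨?_, fun u hu => hle u (by simp [hu])⟩
    rcases List.mem_cons.mp hmem with rfl | h
    · exact ha
    · exact h
  · rintro ⟨hmem, hle⟩
    refine ⟨by simp [hmem], ?_⟩
    intro u hu
    rcases List.mem_cons.mp hu with rfl | h
    · exact hle _ ha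
    · exact hle _ h

theorem pvIsMin_absorb {b a : Int} {w : List Int} (ha : a ∈ w) :
    pvIsMin b (a :: w) ↔ pvIsMin b w := by
  constructor
  · rintro ⟨hmem, hle⟩
    refine ⟨?_, fun u hu => hle u (by simp [hu])⟩
    rcases List.mem_cons.mp hmem with rfl | h
    · exact ha
    · exact h
  · rintro ⟨hmem, hle⟩
    refine ⟨by simp [hmem], ?_⟩
    intro u hu
    rcases List.mem_cons.mp hu with rfl | h
    · exact hle _ ha
    · exact hle _ h



theorem pvGetD_fst (iv : List (Int × Int)) (k : ℕ) :
    (iv.getD k (0, 0)).1 = (iv.map Prod.fst).getD k 0 := by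
  rcases Nat.lt_or_ge k iv.length with h | h
  · rw [List.getD_eq_getElem _ _ h, List.getD_eq_getElem _ _ (by simpa using h)]
    simp
  · rw [List.getD_eq_default _ _ h, List.getD_eq_default _ _ (by simpa using h)]

theorem pvGetD_snd (iv : List (Int × Int)) (k : ℕ) :
    (iv.getD k (0, 0)).2 = (iv.map Prod.snd).getD k 0 := by
  rcases Nat.lt_or_ge k iv.length with h | h
  · rw [List.getD_eq_getElem _ _ h, List.getD_eq_getElem _ _ (by simpa using h)]
    simp
  · rw [List.getD_eq_default _ _ h, List.getD_eq_default _ _ (by simpa using h)]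

theorem pvInnerB_run (iv : List (Int × Int)) (n : Int) (x y : List Int)
    (hx : x = iv.map Prod.fst) (hy : y = iv.map Prod.snd) {m : ℕ} (hmn : (m : Int) = n)
    (hmlen : m ≤ iv.length) {i : ℕ} (him : i < m) :
    ∀ (d : ℕ), ∀ (v : ℕ), m - v ≤ d → i ≤ v → v ≤ m →
      ∀ (hi lo best : Int),
      pvIsMax hi (x.getD i 0 :: pvWin x i v) →
      pvIsMin lo (y.getD i 0 :: pvWin y i v) →
      0 ≤ best →
      (∀ l u : ℕ, l < u → u ≤ m → pvValid x y l u → (l < i ∨ (l = i ∧ u ≤ v)) →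
        (u : Int) - l ≤ best) →
      (best = 0 ∨ ∃ l u : ℕ, l < u ∧ u ≤ m ∧ pvValid x y l u ∧ best = (u : Int) - l) →
      (0 ≤ ((PySem.List.pyRange (v : Int) n 1).foldl (pvInnerB iv (i : Int)) (hi, lo, best)).2.2 ∧
        (∀ l u : ℕ, l < u → u ≤ m → pvValid x y l u → (l < i ∨ l = i) →
          (u : Int) - l ≤ ((PySem.List.pyRange (v : Int) n 1).foldl (pvInnerB iv (i : Int)) (hi, lo, best)).2.2) ∧
        (((PySem.List.pyRange (v : Int) n 1).foldl (pvInnerB iv (i : Int)) (hi, lo, best)).2.2 = 0 ∨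
          ∃ l u : ℕ, l < u ∧ u ≤ m ∧ pvValid x y l u ∧
            ((PySem.List.pyRange (v : Int) n 1).foldl (pvInnerB iv (i : Int)) (hi, lo, best)).2.2 = (u : Int) - l)) := by
  have hxlen : x.length = iv.length := by rw [hx]; simp
  have hylen : y.length = iv.length := by rw [hy]; simp
  intro d
  induction d with
  | zero =>
      intro v hd hiv hvm hi lo best hmax hmin h0 hb he
      have hv : v = m := by omega
      subst hv
      rw [PySem.List.pyRange_one_eq_nil (by omega)]
      simp only [List.foldl_nil]
      refine ⟨h0, ?_, he⟩
      intro l u h1 h2 hv hli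
      rcases hli with hli | rfl
      · exact hb l u h1 h2 hv (Or.inl hli)
      · exact hb l u h1 h2 hv (Or.inr ⟨rfl, h2⟩)
  | succ d ih =>
      intro v hd hiv hvm hi lo best hmax hmin h0 hb he
      rcases Nat.eq_or_lt_of_le hvm with hv | hvlt
      · subst hv
        rw [PySem.List.pyRange_one_eq_nil (by omega)]
        simp only [List.foldl_nil]
        refine ⟨h0, ?_, he⟩
        intro l u h1 h2 hvv hli
        rcases hli with hli | rfl
        · exact hb l u h1 h2 hvv (Or.inl hli)
        · exact hb l u h1 h2 hvv (Or.inr ⟨rfl, h2⟩)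
      · rw [PySem.List.pyRange_one_cons (by omega)]
        simp only [List.foldl_cons]
        have hvlen : v < x.length := by omega
        have hf1 : m - (v + 1) ≤ d := by omega
        have hf2 : i ≤ v + 1 := by omega
        have hf3 : v + 1 ≤ m := by omega
        have heq1 : (iv.getD ((v : Int)).toNat (0, 0)).1 = x.getD v 0 := by
          rw [Int.toNat_natCast, pvGetD_fst, ← hx]
        have heq2 : (iv.getD ((v : Int)).toNat (0, 0)).2 = y.getD v 0 := by
          rw [Int.toNat_natCast, pvGetD_snd, ← hy]
        have hstep : pvInnerB iv (i : Int) (hi, lo, best) (v : Int) =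
            (max hi (x.getD v 0), min lo (y.getD v 0),
              if max hi (x.getD v 0) ≤ min lo (y.getD v 0) ∧ (v : Int) - i + 1 > best
                then (v : Int) - i + 1 else best) := by
          simp only [pvInnerB, heq1, heq2]
          split_ifs with h
          · rfl
          · rfl
        rw [hstep]
        -- new max/min invariants
        have hwin : pvWin x i (v + 1) = pvWin x i v ++ [x.getD v 0] := pvWin_snoc hiv hvlen
        have hwiny : pvWin y i (v + 1) = pvWin y i v ++ [y.getD v 0] :=
          pvWin_snoc hiv (by omega)
        have hmax' : pvIsMax (max hi (x.getD v 0)) (x.getD i 0 :: pvWin x i (v + 1)) := by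
          rw [hwin, ← List.cons_append]
          exact pvIsMax_snoc hmax
        have hmin' : pvIsMin (min lo (y.getD v 0)) (y.getD i 0 :: pvWin y i (v + 1)) := by
          rw [hwiny, ← List.cons_append]
          exact pvIsMin_snoc hmin
        -- validity characterisation of the condition
        have hximem : x.getD i 0 ∈ pvWin x i (v + 1) :=
          (pvWin_mem (by omega)).mpr ⟨i, le_refl i, by omega, rfl⟩
        have hyimem : y.getD i 0 ∈ pvWin y i (v + 1) :=
          (pvWin_mem (by omega)).mpr ⟨i, le_refl i, by omega, rfl⟩
        have hcond : (max hi (x.getD v 0) ≤ min lo (y.getD v 0)) ↔ pvValid x y i (v + 1) :=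
          (pvValid_iff_max_le_min (by omega) (by omega) (by omega)
            ((pvIsMax_absorb hximem).mp hmax')
            ((pvIsMin_absorb hyimem).mp hmin')).symm
        set best1 := if max hi (x.getD v 0) ≤ min lo (y.getD v 0) ∧ (v : Int) - i + 1 > best
          then (v : Int) - i + 1 else best with hbest1
        have h01 : 0 ≤ best1 := by
          rw [hbest1]; split_ifs with h
          · push_cast; omega
          · exact h0
        have hb1 : ∀ l u : ℕ, l < u → u ≤ m → pvValid x y l u →
            (l < i ∨ (l = i ∧ u ≤ v + 1)) → (u : Int) - l ≤ best1 := by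
          intro l u h1 h2 hvv hli
          have hble : best ≤ best1 := by
            rw [hbest1]; split_ifs with h
            · omega
            · exact le_refl best
          rcases hli with hli | ⟨rfl, hu⟩
          · have := hb l u h1 h2 hvv (Or.inl hli); omega
          · rcases Nat.lt_or_ge u (v + 1) with hu' | hu'
            · have := hb l u h1 h2 hvv (Or.inr ⟨rfl, by omega⟩); omega
            · have hu1 : u = v + 1 := by omega
              subst hu1
              rw [hbest1]
              split_ifs with h
              · push_cast; omega
              · rw [not_and_or] at h
                rcases h with h | h
                · exact absurd (hcond.mpr hvv) h
                · push_cast; omega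
        have he1 : best1 = 0 ∨ ∃ l u : ℕ, l < u ∧ u ≤ m ∧ pvValid x y l u ∧
            best1 = (u : Int) - l := by
          rw [hbest1]
          split_ifs with h
          · right
            exact ⟨i, v + 1, by omega, by omega, hcond.mp h.1, by push_cast; omega⟩
          · exact he
        have hcast : (v : Int) + 1 = ((v + 1 : ℕ) : Int) := by push_cast; ring
        rw [hcast]
        exact ih (v + 1) hf1 hf2 hf3 (max hi (x.getD v 0))
          (min lo (y.getD v 0)) best1 hmax' hmin' h01 hb1 he1

theorem pvFoldB_run (iv : List (Int × Int)) (n : Int) (x y : List Int)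
    (hx : x = iv.map Prod.fst) (hy : y = iv.map Prod.snd) {m : ℕ} (hm : m = n.toNat)
    (hmlen : m ≤ iv.length) :
    ∀ t, t ≤ m →
      (0 ≤ (List.range t).foldl (fun (b : Int) (k : ℕ) => pvOuterB n iv b (k : Int)) 0 ∧
        (∀ l u : ℕ, l < u → u ≤ m → pvValid x y l u → l < t →
          (u : Int) - l ≤ (List.range t).foldl (fun (b : Int) (k : ℕ) => pvOuterB n iv b (k : Int)) 0) ∧
        ((List.range t).foldl (fun (b : Int) (k : ℕ) => pvOuterB n iv b (k : Int)) 0 = 0 ∨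
          ∃ l u : ℕ, l < u ∧ u ≤ m ∧ pvValid x y l u ∧
            (List.range t).foldl (fun (b : Int) (k : ℕ) => pvOuterB n iv b (k : Int)) 0 = (u : Int) - l)) := by
  intro t
  induction t with
  | zero =>
      intro _
      refine ⟨le_refl 0, ?_, Or.inl rfl⟩
      intro l u _ _ _ h
      omega
  | succ t ih =>
      intro htm
      have hmn : (m : Int) = n := by
        have hn0 : 0 ≤ n := by
          by_contra hneg
          push Not at hneg
          rw [Int.toNat_of_nonpos (le_of_lt hneg)] at hm
          omega
        rw [hm, Int.toNat_of_nonneg hn0]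
      obtain ⟨h0, hb, he⟩ := ih (by omega)
      rw [List.range_succ, List.foldl_append, List.foldl_cons, List.foldl_nil]
      have heq1 : (iv.getD ((t : Int)).toNat (0, 0)).1 = x.getD t 0 := by
        rw [Int.toNat_natCast, pvGetD_fst, ← hx]
      have heq2 : (iv.getD ((t : Int)).toNat (0, 0)).2 = y.getD t 0 := by
        rw [Int.toNat_natCast, pvGetD_snd, ← hy]
      have houter : pvOuterB n iv ((List.range t).foldl (fun (b : Int) (k : ℕ) => pvOuterB n iv b (k : Int)) 0) (t : Int) =
          ((PySem.List.pyRange (t : Int) n 1).foldl (pvInnerB iv (t : Int))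
            (x.getD t 0, y.getD t 0,
              (List.range t).foldl (fun (b : Int) (k : ℕ) => pvOuterB n iv b (k : Int)) 0)).2.2 := by
        simp only [pvOuterB, heq1, heq2]
      rw [houter]
      have hmax0 : pvIsMax (x.getD t 0) (x.getD t 0 :: pvWin x t t) := by
        have : pvWin x t t = [] := by simp [pvWin]
        rw [this]
        exact ⟨by simp, by simp⟩
      have hmin0 : pvIsMin (y.getD t 0) (y.getD t 0 :: pvWin y t t) := by
        have : pvWin y t t = [] := by simp [pvWin]
        rw [this]
        exact ⟨by simp, by simp⟩
      have hb0 : ∀ l u : ℕ, l < u → u ≤ m → pvValid x y l u →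
          (l < t ∨ (l = t ∧ u ≤ t)) → (u : Int) - l ≤
            (List.range t).foldl (fun (b : Int) (k : ℕ) => pvOuterB n iv b (k : Int)) 0 := by
        intro l u h1 h2 hv hli
        rcases hli with hli | ⟨rfl, hu⟩
        · exact hb l u h1 h2 hv hli
        · omega
      obtain ⟨h0', hb', he'⟩ := pvInnerB_run iv n x y hx hy hmn hmlen (by omega)
        (m - t) t (by omega) (le_refl t) (by omega) _ _ _ hmax0 hmin0 h0 hb0 he
      refine ⟨h0', ?_, he'⟩
      intro l u h1 h2 hv hlt
      exact hb' l u h1 h2 hv (by omega)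

theorem pv_main (n : Int) (iv : List (Int × Int))
    (hpre : Pre_longest_non_decreasing_interval n iv) :
    longest_non_decreasing_interval n iv = longest_non_decreasing_interval_alt n iv := by
  obtain ⟨hlen, hpv⟩ := hpre
  have hy : (iv.map Prod.snd).length = (iv.map Prod.fst).length := by simp
  have hmx : n.toNat ≤ (iv.map Prod.fst).length := by
    simp only [List.length_map]
    omega
  have hsv : ∀ i, i < n.toNat →
      (iv.map Prod.fst).getD i 0 ≤ (iv.map Prod.snd).getD i 0 := by
    intro i him
    have hilen : i < iv.length := by
      simp only [List.length_map] at hmx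
      omega
    have hmem : iv[i] ∈ iv.take n.toNat := by
      rw [List.mem_iff_getElem]
      exact ⟨i, by simp [List.length_take]; omega, by simp [List.getElem_take]⟩
    have := hpv iv[i] hmem
    rw [← pvGetD_fst, ← pvGetD_snd] at *
    rw [List.getD_eq_getElem _ _ hilen] at *
    exact this
  have hrange : PySem.List.pyRange 0 n 1 = (List.range n.toNat).map (fun k : ℕ => (k : Int)) := by
    rw [PySem.List.pyRange_one]
    simp
  obtain ⟨res, hfoldA, hpresA⟩ :=
    pvFoldA hy hmx hsv n.toNat (le_refl n.toNat)
  obtain ⟨h0, hb, he⟩ :=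
    pvFoldB_run iv n (iv.map Prod.fst) (iv.map Prod.snd) rfl rfl rfl
      (by simpa using hmx) n.toNat (le_refl n.toNat)
  show ((PySem.List.pyRange 0 n 1).foldl (pvStepA (iv.map Prod.fst) (iv.map Prod.snd))
      ([], [], 0, 0)).2.2.2 = (PySem.List.pyRange 0 n 1).foldl (pvOuterB n iv) 0
  rw [hrange]
  simp only [List.foldl_map]
  have hA : (List.range n.toNat).foldl
      (fun (s : List Int × List Int × Int × Int) (k : ℕ) =>
        pvStepA (iv.map Prod.fst) (iv.map Prod.snd) s (k : Int)) ([], [], 0, 0) =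
      (pvPushMax (pvWin (iv.map Prod.fst) (pvL (iv.map Prod.fst) (iv.map Prod.snd) n.toNat) n.toNat),
        pvPushMin (pvWin (iv.map Prod.snd) (pvL (iv.map Prod.fst) (iv.map Prod.snd) n.toNat) n.toNat),
        ((pvL (iv.map Prod.fst) (iv.map Prod.snd) n.toNat : ℕ) : Int), res) := hfoldA
  rw [hA]
  exact pvPres_unique hpresA
    ⟨h0, fun l u h1 h2 hv => hb l u h1 h2 hv (by omega), he⟩

-- ===== VERDICT (by name: the statement is the Claim_ definition above) =====
theorem longest_non_decreasing_interval_spec : Claim_equal_longest_non_decreasing_interval := by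
  intro n intervals _ hpre
  show longest_non_decreasing_interval n intervals = longest_non_decreasing_interval_alt n intervals
  exact pv_main n intervals hpre
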